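-- pv_equiv track=rewrite | github.com/sindux/cp | gcj/2018/01-saveuniverse.py | parse
-- ===== SOURCE A (Python) =====
-- def parse(prog):
--     ans=[0]
--     for s in prog:
--         if s == 'C':
--             ans.append(0)
--         else:
--             ans[-1]=ans[-1]+1
--     return ans
-- ===== SOURCE B (Python) =====
-- def parse(prog):
--     return [len(seg) for seg in prog.split('C')]
-- ===== Notes on version B (the rewrite author's own statement) =====
-- stated objective: idiomatic
-- what changed: Replaces the per-character loop that mutates a running accumulator list with a tokenize-then-measure decomposition: split the program on 'C' and map len over the segments.
import Mathlib
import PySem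

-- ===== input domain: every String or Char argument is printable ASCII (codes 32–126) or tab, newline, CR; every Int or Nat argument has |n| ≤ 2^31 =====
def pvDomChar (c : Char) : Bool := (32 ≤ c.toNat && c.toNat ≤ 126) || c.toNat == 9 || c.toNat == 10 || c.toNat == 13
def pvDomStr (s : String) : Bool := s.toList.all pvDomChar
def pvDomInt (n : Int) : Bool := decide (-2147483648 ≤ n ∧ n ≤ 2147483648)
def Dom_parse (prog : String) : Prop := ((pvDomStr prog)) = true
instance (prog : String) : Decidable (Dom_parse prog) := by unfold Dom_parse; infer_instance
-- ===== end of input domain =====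

-- B replaces A's per-character accumulator loop with split-on-'C' + map length (idiomatic decomposition).

-- ===== PORT A =====
-- for s in prog: if s == 'C': ans.append(0) else: ans[-1] = ans[-1] + 1
def parse (prog : String) : List Int :=
  prog.toList.foldl
    (fun ans s => if s = 'C' then ans ++ [0] else ans.dropLast ++ [ans.getLast! + 1])
    [0]

-- ===== PORT B =====
-- [len(seg) for seg in prog.split('C')]
def parse_alt (prog : String) : List Int :=
  (PySem.Chars.splitOn prog.toList ['C']).map (fun seg => (seg.length : Int))

-- ===== PRECONDITION & SPEC =====
def Spec_parse (prog : String) (out : List Int) : Prop := out = parse_alt prog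
instance (prog : String) (out : List Int) : Decidable (Spec_parse prog out) := by unfold Spec_parse; infer_instance

-- ===== CLAIM (what is proved, stated in full; the proofs are below) =====
def Claim_equal_parse : Prop := ∀ (prog : String), Dom_parse prog → Spec_parse prog (parse prog)

-- ===== LEMMAS AND PROOFS =====

/-- Reference segmentation: segments of the char list between 'C' delimiters. -/
def pvSegs : List Char → List (List Char)
  | [] => [[]]
  | c :: cs =>
    if c = 'C' then [] :: pvSegs cs
    else (c :: (pvSegs cs).head!) :: (pvSegs cs).tail

theorem pvSegs_ne_nil (cs : List Char) : pvSegs cs ≠ [] := by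
  cases cs with
  | nil => simp [pvSegs]
  | cons c cs =>
    simp only [pvSegs]
    split <;> simp

/-- Prepend a prefix onto the first segment. -/
def pvConsHead (p : List Char) : List (List Char) → List (List Char)
  | [] => [p]
  | s :: ss => (p ++ s) :: ss

theorem pvSplitOn_go_eq (fuel : Nat) (l cur : List Char) (acc : List (List Char))
    (h : l.length ≤ fuel) :
    PySem.Chars.splitOn.go ['C'] fuel l cur acc
      = acc.reverse ++ pvConsHead cur.reverse (pvSegs l) := by
  induction fuel generalizing l cur acc with
  | zero =>
    have : l = [] := by cases l <;> simp_all
    subst this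
    simp [PySem.Chars.splitOn.go, pvSegs, pvConsHead]
  | succ fuel ih =>
    cases l with
    | nil => simp [PySem.Chars.splitOn.go, pvSegs, pvConsHead]
    | cons c rest =>
      have hpref : (['C'].isPrefixOf (c :: rest)) = (c == 'C') := by
        simp [List.isPrefixOf, Bool.and_true, eq_comm]
      by_cases hc : c = 'C'
      · subst hc
        rw [PySem.Chars.splitOn.go]
        simp only [hpref, beq_self_eq_true, if_true]
        rw [ih _ _ _ (by simpa using Nat.le_of_succ_le_succ h)]
        simp [pvSegs]
        cases hs : pvSegs rest with
        | nil => exact absurd hs (pvSegs_ne_nil rest)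
        | cons s ss => simp [pvConsHead]
      · rw [PySem.Chars.splitOn.go]
        simp only [hpref, beq_iff_eq, if_neg hc]
        rw [ih _ _ _ (by simpa using Nat.le_of_succ_le_succ h)]
        have hne := pvSegs_ne_nil rest
        cases hs : pvSegs rest with
        | nil => exact absurd hs hne
        | cons s ss =>
          simp [pvSegs, hc, hs, pvConsHead]


theorem pvSplitOn_eq (cs : List Char) :
    PySem.Chars.splitOn cs ['C'] = pvSegs cs := by
  unfold PySem.Chars.splitOn
  rw [pvSplitOn_go_eq _ _ _ _ (by omega)]
  cases hs : pvSegs cs with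
  | nil => exact absurd hs (pvSegs_ne_nil cs)
  | cons s ss => simp [pvConsHead]

/-- Add `n` to the head of the length list. -/
def pvAddHead (n : Int) : List Int → List Int
  | [] => [n]
  | m :: ms => (n + m) :: ms

theorem pvFoldl_eq (cs : List Char) (a : List Int) (n : Int) :
    cs.foldl (fun ans s => if s = 'C' then ans ++ [0] else ans.dropLast ++ [ans.getLast! + 1])
        (a ++ [n])
      = a ++ pvAddHead n ((pvSegs cs).map (fun seg => (seg.length : Int))) := by
  induction cs generalizing a n with
  | nil => simp [pvSegs, pvAddHead]
  | cons c rest ih =>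
    by_cases hc : c = 'C'
    · subst hc
      rw [List.foldl_cons, if_pos rfl, ih (a ++ [n]) 0]
      cases hs : pvSegs rest with
      | nil => exact absurd hs (pvSegs_ne_nil rest)
      | cons s ss => simp [pvSegs, hs, pvAddHead]
    · simp only [List.foldl_cons, if_neg hc]
      have hdrop : (a ++ [n]).dropLast = a := by simp
      have hlast : (a ++ [n]).getLast! = n := by
        simp [List.getLast!_eq_getLast?_getD]
      rw [hdrop, hlast, ih a (n + 1)]
      have hne := pvSegs_ne_nil rest
      cases hs : pvSegs rest with
      | nil => exact absurd hs hne
      | cons s ss =>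
        simp [pvSegs, hc, hs, pvAddHead]
        omega

-- ===== VERDICT (by name: the statement is the Claim_ definition above) =====
theorem parse_spec : Claim_equal_parse := by
  intro prog _
  unfold Spec_parse parse parse_alt
  rw [pvSplitOn_eq]
  have h := pvFoldl_eq prog.toList [] 0
  simp only [List.nil_append] at h
  rw [h]
  cases hs : pvSegs prog.toList with
  | nil => exact absurd hs (pvSegs_ne_nil prog.toList)
  | cons s ss => simp [pvAddHead]
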